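-- pv_equiv track=rewrite | github.com/jsmithdataanalytics/advent-of-code-2025 | day_04/part_1.py | find_accessible_rolls
-- ===== SOURCE A (Python) =====
-- def find_accessible_rolls(grid: list[list[bool]]) -> set[tuple[int, int]]:
--     accessible_rolls = set()
--
--     offsets = [(-1, -1), (-1, 0), (-1, 1), (0, -1), (0, 1), (1, -1), (1, 0), (1, 1)]
--
--     for i, row in enumerate(grid):
--         for j, roll_found in enumerate(row):
--
--             if roll_found:
--                 neighbours = [(i + a, j + b) for a, b in offsets]
--                 neighbours = [(c, d) for c, d in neighbours if c in range(len(grid)) and d in range(len(row))]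
--                 num_neighbours_with_paper = len([(c, d) for c, d in neighbours if grid[c][d]])
--
--                 if num_neighbours_with_paper < 4:
--                     accessible_rolls.add((i, j))
--
--     return accessible_rolls
-- ===== SOURCE B (Python) =====
-- def find_accessible_rolls(grid: list[list[bool]]) -> set[tuple[int, int]]:
--     offsets = [(-1, -1), (-1, 0), (-1, 1), (0, -1), (0, 1), (1, -1), (1, 0), (1, 1)]
--
--     # pass 1: scatter — every roll adds one "neighbour" contribution to each of
--     # its 8 surrounding coordinates (no bounds check needed: phantom coordinates
--     # are never queried, pass 2 only looks up real cells)
--     targets = []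
--     for i, row in enumerate(grid):
--         for j, roll_found in enumerate(row):
--             if roll_found:
--                 targets += [(i + a, j + b) for a, b in offsets]
--
--     counts = {}
--     for t in targets:
--         counts[t] = counts.get(t, 0) + 1
--
--     # pass 2: a roll is accessible iff its accumulated neighbour count is < 4
--     accessible_rolls = set()
--     for i, row in enumerate(grid):
--         for j, roll_found in enumerate(row):
--             if roll_found and counts.get((i, j), 0) < 4:
--                 accessible_rolls.add((i, j))
--
--     return accessible_rolls
-- ===== Notes on version B (the rewrite author's own statement) =====
-- stated objective: alternative
-- what changed: A gathers: for each roll it builds its 8 neighbour coordinates, filters them by bounds and counts which hold rolls; B scatters: one pass adds +1 into a dict for each of the 8 coordinates around every roll (no bounds checks), then a second pass keeps the rolls whose accumulated tally is < 4.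
import Mathlib
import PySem

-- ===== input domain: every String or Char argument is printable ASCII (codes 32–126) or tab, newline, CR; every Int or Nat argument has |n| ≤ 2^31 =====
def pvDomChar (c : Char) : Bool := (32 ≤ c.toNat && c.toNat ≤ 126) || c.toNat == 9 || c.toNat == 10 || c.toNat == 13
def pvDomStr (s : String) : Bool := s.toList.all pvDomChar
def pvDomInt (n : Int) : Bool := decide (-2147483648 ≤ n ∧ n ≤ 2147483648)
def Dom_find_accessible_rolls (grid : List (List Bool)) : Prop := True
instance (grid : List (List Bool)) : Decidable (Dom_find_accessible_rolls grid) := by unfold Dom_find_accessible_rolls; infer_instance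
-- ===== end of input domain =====

-- B replaces A's per-roll gather (build, bounds-filter and count the 8 neighbours of each roll)
-- by a two-pass scatter: every roll adds +1 to each of its 8 surrounding coordinates in a dict,
-- then a roll is kept iff its accumulated tally is < 4 (objective: alternative, same asymptotic cost).

-- ===== PORT A =====
def find_accessible_rolls (grid : List (List Bool)) : List (Int × Int) :=
  let offsets : List (Int × Int) := [(-1,-1),(-1,0),(-1,1),(0,-1),(0,1),(1,-1),(1,0),(1,1)]
  (PySem.List.enumerate grid).foldl (fun acc p =>
    (PySem.List.enumerate p.2).foldl (fun acc q =>
      if q.2 then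
        let neighbours := offsets.map (fun o => (p.1 + o.1, q.1 + o.2))
        let neighbours2 := neighbours.filter (fun t =>
          decide (0 ≤ t.1 ∧ t.1 < (grid.length : Int) ∧ 0 ≤ t.2 ∧ t.2 < (p.2.length : Int)))
        -- grid[c][d]: after the bounds filter both indexes are in range on Pre_ (rectangular
        -- grids), where pyGetD's default is never read; on ragged grids Python may raise
        -- IndexError here — excluded by Pre_.
        let num := (neighbours2.filter (fun t =>
          PySem.List.pyGetD (PySem.List.pyGetD grid t.1 []) t.2 false)).length
        if num < 4 then PySem.Set.add acc (p.1, q.1) else acc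
      else acc) acc) PySem.Set.empty

-- ===== PORT B =====
def pvTargets_find_accessible_rolls (grid : List (List Bool)) : List (Int × Int) :=
  let offsets : List (Int × Int) := [(-1,-1),(-1,0),(-1,1),(0,-1),(0,1),(1,-1),(1,0),(1,1)]
  (PySem.List.enumerate grid).foldl (fun acc p =>
    (PySem.List.enumerate p.2).foldl (fun acc q =>
      if q.2 then acc ++ offsets.map (fun o => (p.1 + o.1, q.1 + o.2)) else acc) acc) []

def pvCounts_find_accessible_rolls (grid : List (List Bool)) : PySem.Dict (Int × Int) Int :=
  (pvTargets_find_accessible_rolls grid).foldl (fun d t => d.insert t (d.getD t 0 + 1)) PySem.Dict.empty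

def find_accessible_rolls_alt (grid : List (List Bool)) : List (Int × Int) :=
  let counts := pvCounts_find_accessible_rolls grid
  (PySem.List.enumerate grid).foldl (fun acc p =>
    (PySem.List.enumerate p.2).foldl (fun acc q =>
      if q.2 && decide (counts.getD (p.1, q.1) 0 < 4) then PySem.Set.add acc (p.1, q.1) else acc) acc) PySem.Set.empty

-- ===== PRECONDITION & SPEC =====
def pvOffs : List (Int × Int) := [(-1,-1),(-1,0),(-1,1),(0,-1),(0,1),(1,-1),(1,0),(1,1)]

-- Pre_ excludes exactly the inputs on which A raises IndexError: grids with a roll one of whose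
-- neighbour coordinates passes A's bounds check (taken from the roll's own row) but falls past
-- the end of a shorter neighbouring row; A returns normally on every other grid.
def Pre_find_accessible_rolls (grid : List (List Bool)) : Prop :=
  ∀ ci < grid.length, ∀ cj < (grid.getD ci []).length,
    (grid.getD ci []).getD cj false = true →
    ∀ o ∈ pvOffs,
      0 ≤ (ci : Int) + o.1 → (ci : Int) + o.1 < (grid.length : Int) →
      0 ≤ (cj : Int) + o.2 → (cj : Int) + o.2 < ((grid.getD ci []).length : Int) →
      (cj : Int) + o.2 < ((grid.getD ((ci : Int) + o.1).toNat []).length : Int)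
instance (grid : List (List Bool)) : Decidable (Pre_find_accessible_rolls grid) := by
  unfold Pre_find_accessible_rolls
  exact Nat.decidableBallLT _ _
def pvWitness_find_accessible_rolls : List (List Bool) := [[true, false], [false, true]]

def Spec_find_accessible_rolls (grid : List (List Bool)) (out : List (Int × Int)) : Prop := out = find_accessible_rolls_alt grid
instance (grid : List (List Bool)) (out : List (Int × Int)) : Decidable (Spec_find_accessible_rolls grid out) := by unfold Spec_find_accessible_rolls; infer_instance

-- ===== CLAIM (what is proved, stated in full; the proofs are below) =====
def Claim_equal_find_accessible_rolls : Prop := ∀ (grid : List (List Bool)), Dom_find_accessible_rolls grid → Pre_find_accessible_rolls grid → Spec_find_accessible_rolls grid (find_accessible_rolls grid)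

-- ===== LEMMAS AND PROOFS =====

/-- `true` iff `(c, d)` is an in-bounds cell of `grid` holding `true`. -/
def pvCellT (grid : List (List Bool)) (c d : Int) : Bool :=
  decide (0 ≤ c) && decide (0 ≤ d) && ((grid.getD c.toNat []).getD d.toNat false)

/-- `true` iff position `d` (counted from start index `s`) of `row` holds `true`. -/
def pvRowT (row : List Bool) (s d : Int) : Bool :=
  decide (0 ≤ d - s) && row.getD (d - s).toNat false

/-- `true` iff cell `(c - s, d)` of `grid` holds `true` (row indices counted from `s`). -/
def pvGridT (grid : List (List Bool)) (s c d : Int) : Bool :=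
  decide (0 ≤ c - s) && pvRowT (grid.getD (c - s).toNat []) 0 d

theorem pvRowT_cons (v : Bool) (row : List Bool) (s d : Int) :
    pvRowT (v :: row) s d = if d = s then v else pvRowT row (s + 1) d := by
  unfold pvRowT
  rcases lt_trichotomy d s with h | h | h
  · have h1 : ¬ (0 ≤ d - s) := by omega
    have h2 : ¬ (0 ≤ d - (s+1)) := by omega
    simp [show ¬ s ≤ d by omega, show d ≠ s by omega]
    exact fun h' => absurd h' (by omega)
  · subst h; simp
  · have h3 : (d - s).toNat = (d - (s+1)).toNat + 1 := by omega
    simp [h3, show s ≤ d by omega, show s < d by omega, show d ≠ s by omega]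

theorem pvCountP_disj {α : Type} (l : List α) (p q : α → Bool)
    (h : ∀ x ∈ l, ¬(p x = true ∧ q x = true)) :
    l.countP (fun x => p x || q x) = l.countP p + l.countP q := by
  induction l with
  | nil => simp
  | cons x l ih =>
    have hx := h x (by simp)
    have hl := ih (fun y hy => h y (by simp [hy]))
    simp only [List.countP_cons, hl]
    cases hp : p x <;> cases hq : q x <;> simp_all <;> omega

theorem pvRowT_neg (row : List Bool) (s d : Int) (h : d < s) : pvRowT row s d = false := by
  unfold pvRowT
  simp
  exact fun h' => absurd h' (by omega)

theorem pvRowCount (row : List Bool) (s c i j : Int) :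
    ((PySem.List.enumerate row s).flatMap
        (fun q => if q.2 then pvOffs.map (fun o => (c + o.1, q.1 + o.2)) else [])).count (i, j)
    = pvOffs.countP (fun o => decide (c + o.1 = i) && pvRowT row s (j - o.2)) := by
  induction row generalizing s with
  | nil =>
    simp [PySem.List.enumerate, pvRowT]
  | cons v row ih =>
    rw [PySem.List.enumerate_cons]
    rw [List.flatMap_cons, List.count_append]
    rw [ih (s + 1)]
    -- head piece
    have hhead : ((if v then pvOffs.map (fun o => (c + o.1, s + o.2)) else []) : List (Int × Int)).count (i, j)
        = pvOffs.countP (fun o => decide (c + o.1 = i) && (decide (j - o.2 = s) && v)) := by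
      cases v
      · simp
      · rw [if_pos rfl, List.count_eq_countP, List.countP_map]
        apply List.countP_congr
        intro o _
        simp only [Function.comp, Bool.and_true, beq_iff_eq, Prod.mk.injEq, Bool.and_eq_true,
          decide_eq_true_eq]
        omega
    rw [hhead]
    rw [← pvCountP_disj _ _ _ (by
      intro o _
      rintro ⟨h1, h2⟩
      simp only [Bool.and_eq_true, decide_eq_true_eq] at h1 h2
      have := pvRowT_neg row (s + 1) (j - o.2) (by omega)
      rw [this] at h2
      exact absurd h2.2 (by simp))]
    apply List.countP_congr
    intro o _
    rw [pvRowT_cons]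
    by_cases he : j - o.2 = s
    · rw [if_pos he]
      have hf := pvRowT_neg row (s + 1) (j - o.2) (by omega)
      rw [he] at hf
      simp [he, hf]
    · rw [if_neg he]
      simp [he]

theorem pvGridT_neg (grid : List (List Bool)) (s c d : Int) (h : c < s) : pvGridT grid s c d = false := by
  unfold pvGridT
  simp
  exact fun h' => absurd h' (by omega)

theorem pvGridT_cons (row : List Bool) (grid : List (List Bool)) (s c d : Int) :
    pvGridT (row :: grid) s c d = if c = s then pvRowT row 0 d else pvGridT grid (s + 1) c d := by
  unfold pvGridT
  rcases lt_trichotomy c s with h | h | h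
  · simp [show ¬ s ≤ c by omega, show c ≠ s by omega]
    exact fun h' => absurd h' (by omega)
  · subst h; simp
  · have h3 : (c - s).toNat = (c - (s+1)).toNat + 1 := by omega
    simp [h3, show s ≤ c by omega, show s < c by omega, show c ≠ s by omega]

theorem pvGridCount (grid : List (List Bool)) (s i j : Int) :
    ((PySem.List.enumerate grid s).flatMap (fun p =>
        (PySem.List.enumerate p.2).flatMap
          (fun q => if q.2 then pvOffs.map (fun o => (p.1 + o.1, q.1 + o.2)) else []))).count (i, j)
    = pvOffs.countP (fun o => pvGridT grid s (i - o.1) (j - o.2)) := by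
  induction grid generalizing s with
  | nil =>
    simp [PySem.List.enumerate, pvGridT, pvRowT]
  | cons row grid ih =>
    rw [PySem.List.enumerate_cons, List.flatMap_cons, List.count_append, ih (s + 1)]
    rw [pvRowCount row 0 s i j]
    rw [← pvCountP_disj _ _ _ (by
      intro o _
      rintro ⟨h1, h2⟩
      simp only [Bool.and_eq_true, decide_eq_true_eq] at h1
      have := pvGridT_neg grid (s + 1) (i - o.1) (j - o.2) (by omega)
      rw [this] at h2
      exact absurd h2 (by simp))]
    apply List.countP_congr
    intro o _
    rw [pvGridT_cons]
    by_cases he : i - o.1 = s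
    · rw [if_pos he]
      have hf := pvGridT_neg grid (s + 1) (i - o.1) (j - o.2) (by omega)
      simp [hf, show s + o.1 = i by omega]
    · rw [if_neg he]
      simp [show ¬ (s + o.1 = i) by omega, he]

theorem pvTargets_eq (grid : List (List Bool)) :
    pvTargets_find_accessible_rolls grid
    = (PySem.List.enumerate grid).flatMap (fun p =>
        (PySem.List.enumerate p.2).flatMap
          (fun q => if q.2 then pvOffs.map (fun o => (p.1 + o.1, q.1 + o.2)) else [])) := by
  unfold pvTargets_find_accessible_rolls
  have hinner : ∀ (p : Int × List Bool) (acc : List (Int × Int)),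
      (PySem.List.enumerate p.2).foldl (fun acc q =>
        if q.2 then acc ++ pvOffs.map (fun o => (p.1 + o.1, q.1 + o.2)) else acc) acc
      = acc ++ (PySem.List.enumerate p.2).flatMap
          (fun q => if q.2 then pvOffs.map (fun o => (p.1 + o.1, q.1 + o.2)) else []) := by
    intro p acc
    rw [PySem.List.foldl_congr_mem _ _
      (fun acc q => acc ++ (if q.2 then pvOffs.map (fun o => (p.1 + o.1, q.1 + o.2)) else [])) _
      (by intro a q _; cases hq : q.2 <;> simp [hq])]
    exact PySem.List.foldl_append_eq_flatMap _ _ _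
  rw [PySem.List.foldl_congr_mem _ _
    (fun acc p => acc ++ (PySem.List.enumerate p.2).flatMap
      (fun q => if q.2 then pvOffs.map (fun o => (p.1 + o.1, q.1 + o.2)) else [])) _
    (by intro a p _; exact hinner p a)]
  rw [PySem.List.foldl_append_eq_flatMap]
  simp

theorem pvGridT_zero (grid : List (List Bool)) (c d : Int) :
    pvGridT grid 0 c d = pvCellT grid c d := by
  unfold pvGridT pvRowT pvCellT
  simp [Bool.and_assoc]

theorem pvFlip (g : Int → Int → Bool) (i j : Int) :
    pvOffs.countP (fun o => g (i - o.1) (j - o.2)) = pvOffs.countP (fun o => g (i + o.1) (j + o.2)) := by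
  simp only [pvOffs, List.countP_cons, List.countP_nil]
  norm_num
  ring_nf

theorem pvLookup_eq (grid : List (List Bool)) (hpre : Pre_find_accessible_rolls grid)
    (ci cj : Nat) (hci : ci < grid.length) (hcj : cj < (grid.getD ci []).length)
    (hv : (grid.getD ci []).getD cj false = true) (o : Int × Int) (ho : o ∈ pvOffs) :
    (decide (0 ≤ (ci : Int) + o.1 ∧ (ci : Int) + o.1 < (grid.length : Int) ∧
        0 ≤ (cj : Int) + o.2 ∧ (cj : Int) + o.2 < ((grid.getD ci []).length : Int)) &&
      PySem.List.pyGetD (PySem.List.pyGetD grid ((ci : Int) + o.1) []) ((cj : Int) + o.2) false)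
    = pvCellT grid ((ci : Int) + o.1) ((cj : Int) + o.2) := by
  by_cases hb : 0 ≤ (ci : Int) + o.1 ∧ (ci : Int) + o.1 < (grid.length : Int) ∧
      0 ≤ (cj : Int) + o.2 ∧ (cj : Int) + o.2 < ((grid.getD ci []).length : Int)
  · obtain ⟨h1, h2, h3, h4⟩ := hb
    have hc' : (ci : Int) + o.1 = ((((ci : Int) + o.1).toNat : Nat) : Int) := by omega
    have hd' : (cj : Int) + o.2 = ((((cj : Int) + o.2).toNat : Nat) : Int) := by omega
    rw [decide_eq_true (by exact ⟨h1, h2, h3, h4⟩), hc', hd',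
      PySem.List.pyGetD_natCast, PySem.List.pyGetD_natCast]
    unfold pvCellT
    simp only [Int.toNat_natCast]
    simp [show (0:Int) ≤ ((((ci : Int) + o.1).toNat : Nat) : Int) by omega,
      show (0:Int) ≤ ((((cj : Int) + o.2).toNat : Nat) : Int) by omega]
  · rw [decide_eq_false hb, Bool.false_and]
    by_contra hcell
    have hcell' : pvCellT grid ((ci : Int) + o.1) ((cj : Int) + o.2) = true := by
      cases h : pvCellT grid ((ci : Int) + o.1) ((cj : Int) + o.2)
      · exact absurd h.symm hcell
      · rfl
    unfold pvCellT at hcell'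
    simp only [Bool.and_eq_true, decide_eq_true_eq] at hcell'
    obtain ⟨⟨hc0, hd0⟩, hval⟩ := hcell'
    have hclen : ((ci : Int) + o.1).toNat < grid.length := by
      by_contra hno
      have hrow : grid.getD ((ci : Int) + o.1).toNat [] = ([] : List Bool) :=
        List.getD_eq_default _ _ (by omega)
      rw [hrow] at hval
      exact absurd hval (by simp)
    have hdlen : ((cj : Int) + o.2).toNat < (grid.getD ((ci : Int) + o.1).toNat []).length := by
      by_contra hno
      rw [List.getD_eq_default _ _ (by omega)] at hval
      exact absurd hval (by simp)
    have ho1 : o.1 = -1 ∨ o.1 = 0 ∨ o.1 = 1 := by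
      fin_cases ho <;> simp
    by_cases hsame : ((ci : Int) + o.1).toNat = ci
    · -- same row: the cell is inside the roll's own row, so all four bounds hold
      apply hb
      refine ⟨hc0, by exact_mod_cast (by omega : ((ci : Int) + o.1) < (grid.length : Int)), hd0, ?_⟩
      rw [← hsame]
      omega
    · -- different row: apply Pre_ at the true cell with the opposite vertical offset
      have hone : o.1 = -1 ∨ o.1 = 1 := by
        rcases ho1 with h | h | h
        · exact Or.inl h
        · exfalso; apply hsame; omega
        · exact Or.inr h
      have ho' : ((ci : Int) - ((ci : Int) + o.1), 0) ∈ pvOffs := by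
        rcases hone with h | h <;> simp [h, pvOffs]
      have := hpre (((ci : Int) + o.1).toNat) hclen (((cj : Int) + o.2).toNat) hdlen hval
        _ ho' (by omega) (by omega) (by omega) (by push_cast; omega)
      -- conclusion: cj + o.2 < length of the roll's own row
      have hidx : ((((ci : Int) + o.1).toNat : Int) + ((ci : Int) - ((ci : Int) + o.1))).toNat = ci := by
        omega
      rw [hidx] at this
      apply hb
      refine ⟨hc0, by omega, hd0, by omega⟩

theorem pvACount (grid : List (List Bool)) (hpre : Pre_find_accessible_rolls grid)
    (ci cj : Nat) (hci : ci < grid.length) (hcj : cj < (grid.getD ci []).length)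
    (hv : (grid.getD ci []).getD cj false = true) :
    (((pvOffs.map (fun o => ((ci : Int) + o.1, (cj : Int) + o.2))).filter (fun t =>
        decide (0 ≤ t.1 ∧ t.1 < (grid.length : Int) ∧ 0 ≤ t.2 ∧
          t.2 < ((grid.getD ci []).length : Int)))).filter
      (fun t => PySem.List.pyGetD (PySem.List.pyGetD grid t.1 []) t.2 false)).length
    = pvOffs.countP (fun o => pvCellT grid ((ci : Int) + o.1) ((cj : Int) + o.2)) := by
  rw [← List.countP_eq_length_filter, List.countP_filter, List.countP_map]
  apply List.countP_congr
  intro o ho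
  simp only [Function.comp]
  rw [Bool.and_comm, pvLookup_eq grid hpre ci cj hci hcj hv o ho]

theorem pvCounts_getD (grid : List (List Bool)) (i j : Int) :
    (pvCounts_find_accessible_rolls grid).getD (i, j) 0
    = ((pvOffs.countP (fun o => pvGridT grid 0 (i - o.1) (j - o.2)) : Nat) : Int) := by
  unfold pvCounts_find_accessible_rolls
  rw [PySem.Dict.getD_foldl_insert_add_one]
  rw [pvTargets_eq, pvGridCount]
  simp [PySem.Dict.empty, PySem.Dict.getD, PySem.Dict.get?]

-- ===== VERDICT (by name: the statement is the Claim_ definition above) =====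
theorem find_accessible_rolls_spec : Claim_equal_find_accessible_rolls := by
  intro grid _ hpre
  unfold Spec_find_accessible_rolls find_accessible_rolls find_accessible_rolls_alt
  apply PySem.List.foldl_congr_mem
  intro acc p hp
  obtain ⟨k, hk, hpk⟩ := (PySem.List.mem_enumerate_iff _ _ _).mp hp
  subst hpk
  apply PySem.List.foldl_congr_mem
  intro acc2 q hq
  obtain ⟨m, hm, hqm⟩ := (PySem.List.mem_enumerate_iff _ _ _).mp hq
  subst hqm
  simp only [zero_add] at hm ⊢
  cases hv : grid[k][m]
  · simp [hv]
  · simp only [hv, Bool.true_and, if_true]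
    have hoffs : ([(-1,-1),(-1,0),(-1,1),(0,-1),(0,1),(1,-1),(1,0),(1,1)] : List (Int × Int)) = pvOffs := rfl
    rw [hoffs]
    have hgd : grid.getD k [] = grid[k] := List.getD_eq_getElem _ _ hk
    have hm' : m < (grid.getD k []).length := by rw [hgd]; exact hm
    have hval : (grid.getD k []).getD m false = true := by
      rw [List.getD_eq_getElem _ _ hm']
      simp only [hgd]  -- proof-irrelevant index proof
      exact hv
    have hA := pvACount grid hpre k m hk hm' hval
    rw [hgd] at hA
    have hkey : (pvCounts_find_accessible_rolls grid).getD ((k : Int), (m : Int)) 0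
        = ((((pvOffs.map (fun o => ((k : Int) + o.1, (m : Int) + o.2))).filter (fun t =>
            decide (0 ≤ t.1 ∧ t.1 < (grid.length : Int) ∧ 0 ≤ t.2 ∧
              t.2 < ((grid[k].length : Nat) : Int)))).filter
          (fun t => PySem.List.pyGetD (PySem.List.pyGetD grid t.1 []) t.2 false)).length : Int) := by
      rw [pvCounts_getD, pvFlip (fun a b => pvGridT grid 0 a b) (k : Int) (m : Int)]
      rw [show List.countP (fun o => pvGridT grid 0 ((k : Int) + o.1) ((m : Int) + o.2)) pvOffs
          = List.countP (fun o => pvCellT grid ((k : Int) + o.1) ((m : Int) + o.2)) pvOffs from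
        List.countP_congr (fun o _ => by rw [pvGridT_zero])]
      rw [hA]
    rw [hkey]
    by_cases hlt : (((pvOffs.map (fun o => ((k : Int) + o.1, (m : Int) + o.2))).filter (fun t =>
            decide (0 ≤ t.1 ∧ t.1 < (grid.length : Int) ∧ 0 ≤ t.2 ∧
              t.2 < ((grid[k].length : Nat) : Int)))).filter
          (fun t => PySem.List.pyGetD (PySem.List.pyGetD grid t.1 []) t.2 false)).length < 4
    · rw [if_pos hlt, if_pos (by simp only [decide_eq_true_eq]; exact_mod_cast hlt)]
    · rw [if_neg hlt, if_neg (by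
        simp only [decide_eq_true_eq]
        exact fun hc => hlt (by exact_mod_cast hc))]
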